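-- pv_equiv track=rewrite | github.com/jeongYuri/coding-test-solution | 백준/Silver/1337. 올바른 배열/올바른 배열.py | check
-- ===== SOURCE A (Python) =====
-- def check(arr):
--     arr.sort()
--     n = len(arr)
--     start = 0
--     max_cnt = 0
--
--     for end in range(n):
--         while arr[end]-arr[start]>=5:
--             start +=1
--         current_window = end-start+1
--         max_cnt = max(max_cnt,current_window)
--     return max(0,5-max_cnt)
-- ===== SOURCE B (Python) =====
-- def check(arr):
--     arr.sort()
--     best = 0
--     for end in range(len(arr)):
--         cnt = sum(1 for j in range(end + 1) if arr[end] - arr[j] < 5)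
--         best = max(best, cnt)
--     return max(0, 5 - best)
-- ===== Notes on version B (the rewrite author's own statement) =====
-- stated objective: simpler
-- what changed: Replaces the monotone two-pointer sliding window (mutable start pointer advanced by a while-loop) with a direct per-end count of the elements within distance <5, tracking only the running maximum.
import Mathlib
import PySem

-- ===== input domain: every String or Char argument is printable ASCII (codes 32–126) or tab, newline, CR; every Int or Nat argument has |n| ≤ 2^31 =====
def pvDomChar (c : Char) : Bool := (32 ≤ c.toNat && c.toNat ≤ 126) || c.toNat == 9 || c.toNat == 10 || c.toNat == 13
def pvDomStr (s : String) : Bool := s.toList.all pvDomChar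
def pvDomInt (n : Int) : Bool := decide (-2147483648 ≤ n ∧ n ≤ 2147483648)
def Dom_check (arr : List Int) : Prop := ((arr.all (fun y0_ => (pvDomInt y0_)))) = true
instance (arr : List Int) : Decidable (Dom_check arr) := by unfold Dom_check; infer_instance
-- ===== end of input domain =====

-- B replaces A's two-pointer sliding window by a per-end direct count (simpler, not faster).
-- Both Pythons sort `arr` IN PLACE; the equivalence proved here is about the return value.

-- ===== PORT A =====
-- Python's while always terminates because arr[end]-arr[end] = 0 < 5; the guard
-- `start < e` only makes the recursion total and never changes the computed value.
def checkWhile (s : List Int) (e start : Nat) : Nat :=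
  if h : start < e ∧ 5 ≤ PySem.List.pyGetD s (e : Int) 0 - PySem.List.pyGetD s (start : Int) 0 then
    checkWhile s e (start + 1)
  else start
termination_by e - start
decreasing_by omega

def stepA (s : List Int) (st : Nat × Int) (e : Nat) : Nat × Int :=
  let start := checkWhile s e st.1
  let cur : Int := (e : Int) - (start : Int) + 1
  (start, max st.2 cur)

def check (arr : List Int) : Int :=
  let s := PySem.List.sorted arr (fun x => x) false
  let r := (List.range s.length).foldl (stepA s) (0, 0)
  max 0 (5 - r.2)

-- ===== PORT B =====
def stepB (s : List Int) (b : Int) (e : Nat) : Int :=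
  let cnt : Int :=
    ((List.range (e + 1)).filter
      (fun (j : Nat) => PySem.List.pyGetD s (e : Int) 0 - PySem.List.pyGetD s (j : Int) 0 < 5)).length
  max b cnt

def check_alt (arr : List Int) : Int :=
  let s := PySem.List.sorted arr (fun x => x) false
  let best := (List.range s.length).foldl (stepB s) 0
  max 0 (5 - best)

-- ===== PRECONDITION & SPEC =====
def Spec_check (arr : List Int) (out : Int) : Prop := out = check_alt arr
instance (arr : List Int) (out : Int) : Decidable (Spec_check arr out) := by unfold Spec_check; infer_instance

-- ===== CLAIM (what is proved, stated in full; the proofs are below) =====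
def Claim_equal_check : Prop := ∀ (arr : List Int), Dom_check arr → Spec_check arr (check arr)

-- ===== LEMMAS AND PROOFS =====

theorem getD_mono (s : List Int) (hs : s.Pairwise (· ≤ ·)) {i j : Nat}
    (hij : i ≤ j) (hj : j < s.length) : s.getD i 0 ≤ s.getD j 0 := by
  have hi : i < s.length := Nat.lt_of_le_of_lt hij hj
  rw [List.getD_eq_getElem s 0 hi, List.getD_eq_getElem s 0 hj]
  rcases Nat.lt_or_eq_of_le hij with h | h
  · exact List.pairwise_iff_getElem.mp hs i j hi hj h
  · subst h; exact le_refl _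

theorem while_spec (s : List Int) (_hs : s.Pairwise (· ≤ ·)) :
    ∀ (e start : Nat), e < s.length → start ≤ e →
    (∀ j, j < start → 5 ≤ s.getD e 0 - s.getD j 0) →
    checkWhile s e start ≤ e ∧
    (∀ j, j < checkWhile s e start → 5 ≤ s.getD e 0 - s.getD j 0) ∧
    s.getD e 0 - s.getD (checkWhile s e start) 0 < 5 := by
  intro e start he hle hinv
  induction start using checkWhile.induct s e with
  | case1 start h ih =>
    rw [checkWhile, dif_pos h]
    have hcond : 5 ≤ s.getD e 0 - s.getD start 0 := by
      simpa using h.2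
    have hinv' : ∀ j, j < start + 1 → 5 ≤ s.getD e 0 - s.getD j 0 := by
      intro j hj
      rcases Nat.lt_or_ge j start with hj' | hj'
      · exact hinv j hj'
      · have : j = start := by omega
        subst this; exact hcond
    exact ih h.1 hinv'
  | case2 start h =>
    rw [checkWhile, dif_neg h]
    refine ⟨hle, hinv, ?_⟩
    rcases Nat.lt_or_ge start e with hlt | hge
    · -- the loop stopped with start < e: the numeric condition failed
      have : ¬ 5 ≤ PySem.List.pyGetD s (e : Int) 0 - PySem.List.pyGetD s (start : Int) 0 := by
        intro hc; exact h ⟨hlt, hc⟩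
      simpa using this
    · have : start = e := by omega
      subst this; omega

theorem count_ge (n k : Nat) :
    ((List.range n).filter (fun j => decide (k ≤ j))).length = n - k := by
  induction n with
  | zero => simp
  | succ n ih =>
    rw [List.range_succ, List.filter_append, List.length_append, ih]
    by_cases h : k ≤ n <;> simp [h] <;> omega

theorem count_window (s : List Int) (hs : s.Pairwise (· ≤ ·)) (e st : Nat)
    (he : e < s.length) (_h1 : st ≤ e)
    (h2 : ∀ j, j < st → 5 ≤ s.getD e 0 - s.getD j 0)
    (h3 : s.getD e 0 - s.getD st 0 < 5) :
    ((List.range (e + 1)).filter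
      (fun (j : Nat) => PySem.List.pyGetD s (e : Int) 0 - PySem.List.pyGetD s (j : Int) 0 < 5)).length
    = e + 1 - st := by
  rw [List.filter_congr (q := fun j => decide (st ≤ j)) ?_, count_ge]
  intro j hj
  have hj' : j < e + 1 := List.mem_range.mp hj
  simp only [PySem.List.pyGetD_natCast, decide_eq_decide]
  constructor
  · intro hlt
    by_contra hc
    have := h2 j (by omega)
    omega
  · intro hst
    have hmono : s.getD st 0 ≤ s.getD j 0 :=
      getD_mono s hs hst (by omega)
    omega

theorem fold_eq (s : List Int) (hs : s.Pairwise (· ≤ ·)) :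
    ∀ (d a start : Nat) (m : Int), a + d = s.length → start ≤ a →
    (∀ j, j < start → a < s.length → 5 ≤ s.getD a 0 - s.getD j 0) →
    ((List.range' a d).foldl (stepA s) (start, m)).2 = (List.range' a d).foldl (stepB s) m := by
  intro d
  induction d with
  | zero => intro a start m _ _ _; simp
  | succ d ih =>
    intro a start m hlen hle hinv
    have ha : a < s.length := by omega
    rw [List.range'_succ, List.foldl_cons, List.foldl_cons]
    obtain ⟨hw1, hw2, hw3⟩ :=
      while_spec s hs a start ha hle (fun j hj => hinv j hj ha)
    set st := checkWhile s a start with hst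
    have hcnt :
        ((List.range (a + 1)).filter
          (fun (j : Nat) => PySem.List.pyGetD s (a : Int) 0 - PySem.List.pyGetD s (j : Int) 0 < 5)).length
        = a + 1 - st := count_window s hs a st ha hw1 hw2 hw3
    have hcur : ((a : Int) - (st : Int) + 1) = ((a + 1 - st : Nat) : Int) := by
      omega
    have hB : stepB s m a = max m ((a : Int) - (st : Int) + 1) := by
      simp only [stepB, hcnt, hcur]
    have hA : stepA s (start, m) a = (st, max m ((a : Int) - (st : Int) + 1)) := by
      simp [stepA, ← hst]
    rw [hA, hB]
    apply ih (a + 1) st _ (by omega) (by omega)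
    intro j hj ha1
    have h1 := hw2 j hj
    have h2 : s.getD a 0 ≤ s.getD (a + 1) 0 :=
      getD_mono s hs (by omega) ha1
    omega

-- ===== VERDICT (by name: the statement is the Claim_ definition above) =====
theorem check_spec : Claim_equal_check := by
  intro arr _
  unfold Spec_check
  simp only [check, check_alt]
  have hs : (PySem.List.sorted arr (fun x => x) false).Pairwise (· ≤ ·) := by
    simpa using PySem.List.sorted_pairwise (xs := arr) (key := fun x => x)
  rw [List.range_eq_range']
  rw [fold_eq _ hs _ 0 0 0 (by omega) (by omega) (by omega)]
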